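-- pv_equiv track=rewrite | github.com/AREA-team/AREA-Student | task_dialog.py | get_task_letter
-- ===== SOURCE A (Python) =====
-- def get_task_letter(task_index):
--     task_letter = ''
--     alphabet = 'ABCDEFGHIJKLMNOPQRSTUVWXYZ'
--     while task_index >= 0:
--         if task_index >= 26:
--             task_letter += alphabet[task_index // 26 - 1]
--             task_index %= 26
--         else:
--             task_letter += alphabet[task_index % 26]
--             task_index -= 26
--     return task_letter
-- ===== SOURCE B (Python) =====
-- def get_task_letter(task_index):
--     alphabet = 'ABCDEFGHIJKLMNOPQRSTUVWXYZ'
--     if task_index < 0: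
--         return ''
--     labels = list(alphabet) + [a + b for a in alphabet for b in alphabet]
--     return labels[task_index]
-- ===== Notes on version B (the rewrite author's own statement) =====
-- stated objective: alternative
-- what changed: Instead of A's while loop doing digit arithmetic (index//26-1, index%26) on a mutating index, B builds the complete 702-entry label table once (26 single letters plus a comprehension of all two-letter pairs) and returns labels[task_index], with '' for negatives.
-- outside the precondition, e.g. on get_task_letter(702): A raises IndexError, B raises IndexError
import Mathlib
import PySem

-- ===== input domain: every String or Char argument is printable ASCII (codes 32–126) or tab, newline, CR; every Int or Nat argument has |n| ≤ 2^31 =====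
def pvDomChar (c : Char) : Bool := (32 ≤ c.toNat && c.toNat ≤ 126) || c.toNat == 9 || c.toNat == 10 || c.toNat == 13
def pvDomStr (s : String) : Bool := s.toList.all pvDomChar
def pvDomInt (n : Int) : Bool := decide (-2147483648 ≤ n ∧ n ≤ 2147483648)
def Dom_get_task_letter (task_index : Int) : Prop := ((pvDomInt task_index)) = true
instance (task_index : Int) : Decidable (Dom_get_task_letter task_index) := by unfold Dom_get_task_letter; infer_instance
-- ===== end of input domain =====

-- B replaces A's digit-arithmetic while loop by building the full table of 702 labels once
-- (26 one-letter labels followed by all 26×26 two-letter labels) and indexing it (alternative).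

-- ===== PORT A =====
def pvAlphabet : List Char := "ABCDEFGHIJKLMNOPQRSTUVWXYZ".toList

-- the while loop of A; `none` models an IndexError from alphabet[...] (outside Pre_).
-- fuel is a pure totality guard: the loop runs at most twice (after the ≥26 branch the
-- index is in [0,26), after the <26 branch it is negative), so fuel 3 is never exhausted.
def pvLoopA : Nat → Int → List Char → Option (List Char)
  | 0, _, _ => none
  | fuel + 1, task_index, task_letter =>
    if task_index ≥ 0 then
      if task_index ≥ 26 then
        match PySem.List.pyGet? pvAlphabet (PySem.Int.floordiv task_index 26 - 1) with
        | none => none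
        | some c => pvLoopA fuel (PySem.Int.mod task_index 26) (task_letter ++ [c])
      else
        match PySem.List.pyGet? pvAlphabet (PySem.Int.mod task_index 26) with
        | none => none
        | some c => pvLoopA fuel (task_index - 26) (task_letter ++ [c])
    else
      some task_letter

def get_task_letter (task_index : Int) : String :=
  -- on inputs where the Python raises IndexError (excluded by Pre_) we return ""
  String.mk ((pvLoopA 3 task_index []).getD [])

-- ===== PORT B =====
-- the table `labels` of Source B: single letters, then the comprehension [a+b for a in alphabet for b in alphabet]
def pvLabels : List (List Char) :=
  pvAlphabet.map (fun c => [c]) ++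
  pvAlphabet.flatMap (fun a => pvAlphabet.map (fun b => [a, b]))

def get_task_letter_alt (task_index : Int) : String :=
  if task_index < 0 then ""
  else
    match PySem.List.pyGet? pvLabels task_index with
    | some l => String.mk l
    | none => ""          -- IndexError case (task_index ≥ 702), outside Pre_

-- ===== PRECONDITION & SPEC =====
-- Pre_ excludes task_index ≥ 702, where the Python A (and B) raise IndexError.
def Pre_get_task_letter (task_index : Int) : Prop := task_index < 702
instance (task_index : Int) : Decidable (Pre_get_task_letter task_index) := by
  unfold Pre_get_task_letter; infer_instance

def pvWitness_get_task_letter : Int := (27)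

def Spec_get_task_letter (task_index : Int) (out : String) : Prop := out = get_task_letter_alt task_index
instance (task_index : Int) (out : String) : Decidable (Spec_get_task_letter task_index out) := by unfold Spec_get_task_letter; infer_instance

-- ===== CLAIM (what is proved, stated in full; the proofs are below) =====
def Claim_equal_get_task_letter : Prop := ∀ (task_index : Int), Dom_get_task_letter task_index → Pre_get_task_letter task_index → Spec_get_task_letter task_index (get_task_letter task_index)

-- ===== LEMMAS AND PROOFS =====

-- on the 702 valid indices the loop of A and the table lookup of B agree: checked by evaluation
set_option maxRecDepth 100000 in
set_option maxHeartbeats 1000000 in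
theorem pv_agree_nat : ∀ n : Nat, n < 702 →
    PySem.List.pyGet? pvLabels (n : Int) = some ((pvLoopA 3 (n : Int) []).getD []) := by
  decide

-- ===== VERDICT (by name: the statement is the Claim_ definition above) =====
theorem get_task_letter_spec : Claim_equal_get_task_letter := by
  intro ti _ hpre
  unfold Spec_get_task_letter
  by_cases hneg : ti < 0
  · rw [get_task_letter_alt, if_pos hneg]
    unfold get_task_letter
    rw [pvLoopA, if_neg (by omega)]
    rfl
  · have h : ti = ((ti.toNat : Nat) : Int) := by omega
    have hn : ti.toNat < 702 := by unfold Pre_get_task_letter at hpre; omega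
    rw [h, get_task_letter_alt, if_neg (by omega), pv_agree_nat ti.toNat hn]
    rfl
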